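-- pv_equiv track=rewrite | github.com/AYEOOON/Algorithm | 프로그래머스/Python/2단계/할인 행사.py | solution
-- ===== SOURCE A (Python) =====
-- def solution(want, number, discount):
--     memo = dict(zip(want, number))
--     result = 0
--     start = 0
--
--     while(start <= len(discount)-10):
--         good = 0
--         for p in want:
--             if memo[p] == discount[start:start+10].count(p):
--                 good +=1
--
--         if good == len(want):
--             result += 1
--             start += 1
--         else:
--             start += 1
--
--     return result
-- ===== SOURCE B (Python) =====
-- def solution(want, number, discount):
--     target = dict(zip(want, number))
--     keys = list(target)
--     need = [target[p] for p in keys]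
--     idx = {p: j for j, p in enumerate(keys)}
--     d = [idx.get(x, -1) for x in discount]
--     n = len(d)
--     if n < 10:
--         return 0
--     cnt = [0] * len(keys)
--     for j in d[:10]:
--         if j >= 0:
--             cnt[j] += 1
--     result = 1 if cnt == need else 0
--     for i in range(10, n):
--         o = d[i - 10]
--         a = d[i]
--         if o >= 0:
--             cnt[o] -= 1
--         if a >= 0:
--             cnt[a] += 1
--         if cnt == need:
--             result += 1
--     return result
-- ===== Notes on version B (the rewrite author's own statement) =====
-- stated objective: faster
-- what changed: B replaces A's per-window 10-element slice-and-count over every wanted item with a single sliding pass: discount is mapped once to small integer ids, a count vector is updated in O(1) per step and compared to the needed counts per window.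
import Mathlib
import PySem

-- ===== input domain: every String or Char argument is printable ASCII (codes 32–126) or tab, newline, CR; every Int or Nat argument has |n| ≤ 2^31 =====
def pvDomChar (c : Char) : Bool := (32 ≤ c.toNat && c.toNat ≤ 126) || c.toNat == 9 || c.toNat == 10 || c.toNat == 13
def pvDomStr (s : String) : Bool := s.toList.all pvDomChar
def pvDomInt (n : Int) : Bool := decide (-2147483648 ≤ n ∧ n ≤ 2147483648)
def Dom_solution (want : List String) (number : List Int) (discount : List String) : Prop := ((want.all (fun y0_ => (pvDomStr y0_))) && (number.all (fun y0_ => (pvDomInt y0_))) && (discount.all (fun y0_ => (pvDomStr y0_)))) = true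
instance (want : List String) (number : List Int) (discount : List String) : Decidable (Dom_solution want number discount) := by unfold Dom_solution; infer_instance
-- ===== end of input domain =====

-- B replaces A's per-window slice-and-count with one sliding pass over integer ids (faster by a large constant factor).

-- ===== PORT A =====
-- A's 'memo[p]' raises KeyError when p is missing from dict(zip(want, number)); such inputs are outside
-- Pre_solution, and the port uses getD 0 there.  The 'while start <= len(discount)-10: ... start += 1'
-- loop is the fold over range(0, len(discount)-10+1).
def solution (want : List String) (number : List Int) (discount : List String) : Int :=
  let memo : PySem.Dict String Int := PySem.Dict.ofList (want.zip number)
  (PySem.List.pyRange 0 ((discount.length : Int) - 10 + 1) 1).foldl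
    (fun result start =>
      let good : Int := want.foldl
        (fun g p =>
          if memo.getD p 0 = (PySem.List.count (PySem.List.slice discount (some start) (some (start + 10))) p : Int)
          then g + 1 else g) 0
      if good = (want.length : Int) then result + 1 else result) 0

-- ===== PORT B =====
-- transliteration of Source B; d[i-10] and d[i] inside the loop are always in range (10 ≤ i < n), ported with pyGetD.
def solution_alt (want : List String) (number : List Int) (discount : List String) : Int :=
  let target : PySem.Dict String Int := PySem.Dict.ofList (want.zip number)
  let keys : List String := target.keys
  let need : List Int := keys.map (fun p => target.getD p 0)
  let idx : PySem.Dict String Int := PySem.Dict.ofList ((PySem.List.enumerate keys 0).map (fun e => (e.2, e.1)))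
  let d : List Int := discount.map (fun x => idx.getD x (-1))
  let n : Int := (d.length : Int)
  if n < 10 then 0
  else
    let cnt : List Int := (PySem.List.slice d none (some 10)).foldl
      (fun c j => if 0 ≤ j then c.set j.toNat (c.getD j.toNat 0 + 1) else c)
      (List.replicate keys.length 0)
    let result : Int := if cnt = need then 1 else 0
    let fin := (PySem.List.pyRange 10 n 1).foldl
      (fun (s : List Int × Int) i =>
        let o := PySem.List.pyGetD d (i - 10) 0
        let a := PySem.List.pyGetD d i 0
        let c1 := if 0 ≤ o then s.1.set o.toNat (s.1.getD o.toNat 0 - 1) else s.1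
        let c2 := if 0 ≤ a then c1.set a.toNat (c1.getD a.toNat 0 + 1) else c1
        (c2, if c2 = need then s.2 + 1 else s.2))
      (cnt, result)
    fin.2

-- ===== PRECONDITION & SPEC =====
-- Pre_solution excludes exactly the inputs where A raises KeyError: at least one 10-day window exists and
-- some wanted item is missing from dict(zip(want, number)) (i.e. not among the first len(number) want items).
def Pre_solution (want : List String) (number : List Int) (discount : List String) : Prop :=
  discount.length < 10 ∨ ∀ p ∈ want, p ∈ want.take number.length
instance (want : List String) (number : List Int) (discount : List String) : Decidable (Pre_solution want number discount) := by unfold Pre_solution; infer_instance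
def pvWitness_solution : List String × List Int × List String :=
  (["a"], [1], ["a", "a", "b", "a", "b", "a", "b", "b", "b", "b"])

def Spec_solution (want : List String) (number : List Int) (discount : List String) (out : Int) : Prop := out = solution_alt want number discount
instance (want : List String) (number : List Int) (discount : List String) (out : Int) : Decidable (Spec_solution want number discount out) := by unfold Spec_solution; infer_instance

-- ===== CLAIM (what is proved, stated in full; the proofs are below) =====
def Claim_equal_solution : Prop := ∀ (want : List String) (number : List Int) (discount : List String), Dom_solution want number discount → Pre_solution want number discount → Spec_solution want number discount (solution want number discount)


-- ===== LEMMAS AND PROOFS =====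

-- first-occurrence index of x in keys, as Source B's idx.get(x, -1) computes it
def pvF (keys : List String) (x : String) : Int :=
  match PySem.List.index? keys x with
  | some k => (k : Int)
  | none => -1

-- the count vector of a window w of ids: entry t counts occurrences of id t
def pvVec (K : Nat) (w : List Int) : List Int :=
  (List.range K).map (fun (t : Nat) => (w.count ((t : Int)) : Int))

def pvTarget (want : List String) (number : List Int) : PySem.Dict String Int :=
  PySem.Dict.ofList (want.zip number)

def pvKeys (want : List String) (number : List Int) : List String :=
  (pvTarget want number).keys

def pvNeed (want : List String) (number : List Int) : List Int :=
  (pvKeys want number).map (fun p => (pvTarget want number).getD p 0)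

-- the canonical per-window match test both programs compute
def pvAm (want : List String) (number : List Int) (discount : List String) (s : Nat) : Bool :=
  decide (pvVec (pvKeys want number).length
            (((discount.drop s).take 10).map (pvF (pvKeys want number)))
          = pvNeed want number)

theorem keys_ofList (ps : List (String × Int)) :
    (PySem.Dict.ofList ps).keys = PySem.Set.ofList (ps.map Prod.fst) := by
  have h : PySem.Dict.ofList ps
      = ps.foldl (fun d p => d.insert p.1 p.2) PySem.Dict.empty := rfl
  rw [h, PySem.Dict.keys_foldl_insert_key ps Prod.fst (fun d p => p.2) PySem.Dict.empty]
  simp [PySem.Set.update_nil_left]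

theorem map_fst_zip_take (xs : List String) (ys : List Int) :
    (xs.zip ys).map Prod.fst = xs.take ys.length := by
  induction xs generalizing ys with
  | nil => simp
  | cons x xs ih =>
    cases ys with
    | nil => simp
    | cons y ys => simp [ih]

theorem idx_getD (ks : List String) (x : String) (hn : ks.Nodup) :
    (PySem.Dict.ofList ((PySem.List.enumerate ks 0).map (fun e => (e.2, e.1)))).getD x (-1)
      = pvF ks x := by
  induction ks using List.reverseRecOn with
  | nil => rfl
  | append_singleton ks k ih =>
    have hk : k ∉ ks := by
      simp only [List.nodup_append] at hn
      intro h
      exact hn.2.2 _ h _ (by simp) rfl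
    have hn' : ks.Nodup := (List.nodup_append.mp hn).1
    have he : (PySem.List.enumerate (ks ++ [k]) 0).map (fun e => (e.2, e.1))
        = (PySem.List.enumerate ks 0).map (fun e => (e.2, e.1)) ++ [(k, (ks.length : Int))] := by
      rw [PySem.List.enumerate_append]
      simp [PySem.List.enumerate]
    rw [he]
    have hfold : ∀ (ps : List (String × Int)) (p : String × Int),
        PySem.Dict.ofList (ps ++ [p]) = (PySem.Dict.ofList ps).insert p.1 p.2 := by
      intro ps p
      show (ps ++ [p]).foldl (fun d q => d.insert q.1 q.2) PySem.Dict.empty = _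
      rw [List.foldl_append]; rfl
    rw [hfold, PySem.Dict.getD_insert]
    by_cases hx : x = k
    · subst hx
      simp only [if_true]
      unfold pvF
      rw [PySem.List.index?_append_singleton_self ks x hk]
    · rw [if_neg hx, ih hn']
      unfold pvF
      by_cases hm : x ∈ ks
      · rw [PySem.List.index?_append_of_mem _ hm]
      · rw [(PySem.List.index?_eq_none_iff _ _).mpr hm,
            (PySem.List.index?_eq_none_iff _ _).mpr (by simp [hm, hx])]

theorem pvF_range (ks : List String) (x : String) :
    pvF ks x = -1 ∨ (0 ≤ pvF ks x ∧ (pvF ks x).toNat < ks.length) := by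
  unfold pvF
  cases h : PySem.List.index? ks x with
  | none => left; rfl
  | some k =>
    right
    obtain ⟨hk, -, -⟩ := PySem.List.getElem_of_index?_eq_some h
    simpa using hk

theorem pvF_eq_iff (ks : List String) (hn : ks.Nodup) (x : String) (t : Nat) (ht : t < ks.length) :
    pvF ks x = (t : Int) ↔ x = ks[t] := by
  constructor
  · intro h
    unfold pvF at h
    cases hi : PySem.List.index? ks x with
    | none => rw [hi] at h; simp at h
    | some k =>
      rw [hi] at h
      simp at h
      have hk : k = t := by exact_mod_cast h
      subst hk
      obtain ⟨hk2, hx, -⟩ := PySem.List.getElem_of_index?_eq_some hi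
      exact hx.symm
  · intro h
    subst h
    have hm : ks[t] ∈ ks := List.getElem_mem ht
    have : ∃ k, PySem.List.index? ks ks[t] = some k := by
      cases hi : PySem.List.index? ks ks[t] with
      | none => exact absurd ((PySem.List.index?_eq_none_iff _ _).mp hi) (by simp [hm])
      | some k => exact ⟨k, rfl⟩
    obtain ⟨k, hi⟩ := this
    obtain ⟨hk, hx, -⟩ := PySem.List.getElem_of_index?_eq_some hi
    have := (List.Nodup.getElem_inj_iff hn).mp hx
    unfold pvF
    rw [hi, this]

theorem count_map_pvF (ks : List String) (hn : ks.Nodup) (w : List String) (t : Nat) (ht : t < ks.length) :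
    (w.map (pvF ks)).count ((t : Nat) : Int) = w.count ks[t] := by
  rw [List.count_eq_countP, List.count_eq_countP, List.countP_map]
  apply List.countP_congr
  intro x _
  simp only [Function.comp_apply, beq_iff_eq]
  rw [pvF_eq_iff ks hn x t ht]

theorem pvVec_length (K : Nat) (w : List Int) : (pvVec K w).length = K := by
  unfold pvVec; rw [List.length_map, List.length_range]

theorem pvVec_getElem (K : Nat) (w : List Int) (t : Nat) (ht : t < K) :
    (pvVec K w)[t]'(by rw [pvVec_length]; exact ht) = (w.count (t : Int) : Int) := by
  unfold pvVec
  rw [List.getElem_map, List.getElem_range]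

theorem pvVec_nil (K : Nat) : pvVec K [] = List.replicate K 0 := by
  apply List.ext_getElem (by rw [pvVec_length, List.length_replicate])
  intro t h1 h2
  rw [pvVec_length] at h1
  rw [pvVec_getElem K [] t h1, List.getElem_replicate]
  simp

theorem pvVec_getD (K : Nat) (w : List Int) (t : Nat) (ht : t < K) :
    (pvVec K w).getD t 0 = (w.count (t : Int) : Int) := by
  rw [List.getD_eq_getElem?_getD, List.getElem?_eq_getElem (by rw [pvVec_length]; exact ht),
    pvVec_getElem K w t ht, Option.getD_some]

theorem pvVec_add (K : Nat) (w : List Int) (j : Int)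
    (hj : j = -1 ∨ (0 ≤ j ∧ j.toNat < K)) :
    (if 0 ≤ j then (pvVec K w).set j.toNat ((pvVec K w).getD j.toNat 0 + 1) else pvVec K w)
      = pvVec K (w ++ [j]) := by
  rcases hj with hj | ⟨hj0, hjK⟩
  · subst hj
    rw [if_neg (by norm_num)]
    apply List.ext_getElem (by rw [pvVec_length, pvVec_length])
    intro t h1 h2
    rw [pvVec_length] at h1
    rw [pvVec_getElem K _ t h1, pvVec_getElem K _ t h1, List.count_append]
    have : ((-1 : Int) == (t : Int)) = false := by simp
    rw [List.count_singleton, this]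
    simp
  · rw [if_pos hj0, pvVec_getD K w j.toNat hjK]
    apply List.ext_getElem (by rw [List.length_set, pvVec_length, pvVec_length])
    intro t h1 h2
    rw [List.length_set, pvVec_length] at h1
    rw [List.getElem_set, pvVec_getElem K (w ++ [j]) t h1, List.count_append]
    have hc : ((j.toNat : Nat) : Int) = j := by omega
    by_cases he : j.toNat = t
    · subst he
      rw [if_pos rfl, hc, List.count_singleton]
      simp
    · rw [if_neg he, pvVec_getElem K w t h1, List.count_singleton]
      have : (j == (t : Int)) = false := by simp; omega
      rw [this]
      simp

theorem pvVec_sub (K : Nat) (r : List Int) (j : Int)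
    (hj : j = -1 ∨ (0 ≤ j ∧ j.toNat < K)) :
    (if 0 ≤ j then (pvVec K (j :: r)).set j.toNat ((pvVec K (j :: r)).getD j.toNat 0 - 1) else pvVec K (j :: r))
      = pvVec K r := by
  rcases hj with hj | ⟨hj0, hjK⟩
  · subst hj
    rw [if_neg (by norm_num)]
    apply List.ext_getElem (by rw [pvVec_length, pvVec_length])
    intro t h1 h2
    rw [pvVec_length] at h1
    rw [pvVec_getElem K _ t h1, pvVec_getElem K _ t h1]
    have : ((-1 : Int) == (t : Int)) = false := by simp
    rw [List.count_cons, this]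
    simp
  · rw [if_pos hj0, pvVec_getD K _ j.toNat hjK]
    apply List.ext_getElem (by rw [List.length_set, pvVec_length, pvVec_length])
    intro t h1 h2
    rw [List.length_set, pvVec_length] at h1
    rw [List.getElem_set, pvVec_getElem K r t h1]
    have hc : ((j.toNat : Nat) : Int) = j := by omega
    by_cases he : j.toNat = t
    · subst he
      rw [if_pos rfl, hc, List.count_cons_self]
      push_cast
      ring
    · rw [if_neg he, pvVec_getElem K (j :: r) t h1]
      have : (j == (t : Int)) = false := by simp; omega
      rw [List.count_cons, this]
      simp

-- building the first window's count vector
theorem pvBuild (K : Nat) (w u : List Int)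
    (hw : ∀ j ∈ w, j = -1 ∨ (0 ≤ j ∧ j.toNat < K)) :
    w.foldl (fun c j => if 0 ≤ j then c.set j.toNat (c.getD j.toNat 0 + 1) else c) (pvVec K u)
      = pvVec K (u ++ w) := by
  induction w generalizing u with
  | nil => simp
  | cons j w ih =>
    rw [List.foldl_cons, pvVec_add K u j (hw j (by simp)),
      ih (u ++ [j]) (fun x hx => hw x (by simp [hx]))]
    simp

-- the sliding-window loop invariant
theorem pvLoop (K : Nat) (need d : List Int)
    (hd : ∀ j ∈ d, j = -1 ∨ (0 ≤ j ∧ j.toNat < K)) :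
    ∀ (m : Nat), m ≤ d.length - 10 → 10 ≤ d.length → ∀ (r : Int),
    ((List.range m).map (fun (k : Nat) => ((10 : Int) + (k : Int)))).foldl
      (fun (s : List Int × Int) i =>
        let o := PySem.List.pyGetD d (i - 10) 0
        let a := PySem.List.pyGetD d i 0
        let c1 := if 0 ≤ o then s.1.set o.toNat (s.1.getD o.toNat 0 - 1) else s.1
        let c2 := if 0 ≤ a then c1.set a.toNat (c1.getD a.toNat 0 + 1) else c1
        (c2, if c2 = need then s.2 + 1 else s.2))
      (pvVec K (d.take 10), r)
    = (pvVec K ((d.drop m).take 10),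
       r + ((List.range m).countP (fun k => decide (pvVec K ((d.drop (k+1)).take 10) = need)) : Int)) := by
  intro m
  induction m with
  | zero => simp
  | succ m ih =>
    intro hm hn r
    rw [List.range_succ, List.map_append, List.foldl_append, ih (by omega) hn r]
    have hmlt : m < d.length := by omega
    have hm10 : m + 10 < d.length := by omega
    simp only [List.map_cons, List.map_nil, List.foldl_cons, List.foldl_nil]
    have e1 : (10 : Int) + (m : Int) - 10 = ((m : Nat) : Int) := by ring
    have e2 : (10 : Int) + (m : Int) = (((m + 10 : Nat)) : Int) := by push_cast; ring
    rw [e1, e2, PySem.List.pyGetD_natCast, PySem.List.pyGetD_natCast]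
    have g1 : d.getD m 0 = d[m] := List.getD_eq_getElem d 0 hmlt
    have g2 : d.getD (m + 10) 0 = d[m + 10] := List.getD_eq_getElem d 0 hm10
    rw [g1, g2]
    have hw : (d.drop m).take 10 = d[m] :: ((d.drop (m+1)).take 9) := by
      rw [List.drop_eq_getElem_cons hmlt, show (10 : Nat) = 9 + 1 from rfl, List.take_succ_cons]
    have hw2 : (d.drop (m+1)).take 10 = ((d.drop (m+1)).take 9) ++ [d[m + 10]] := by
      have h10 := List.take_add_one (l := d.drop (m+1)) (i := 9)
      rw [List.getElem?_drop, show m + 1 + 9 = m + 10 from by omega,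
        List.getElem?_eq_getElem hm10] at h10
      exact h10
    rw [hw, pvVec_sub K _ d[m] (hd d[m] (List.getElem_mem hmlt)),
      pvVec_add K _ d[m + 10] (hd d[m + 10] (List.getElem_mem hm10)), ← hw2]
    rw [List.countP_append]
    simp only [List.countP_cons, List.countP_nil, decide_eq_true_eq]
    by_cases h : pvVec K ((d.drop (m+1)).take 10) = need
    · rw [if_pos h, if_pos h]
      congr 1
      push_cast
      ring
    · rw [if_neg h, if_neg h]
      simp

-- the per-window condition both programs test, in each program's own form
theorem pvMatch (want : List String) (number : List Int) (W : List String)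
    (hpre : ∀ p ∈ want, p ∈ want.take number.length) :
    (pvVec (pvKeys want number).length (W.map (pvF (pvKeys want number))) = pvNeed want number)
      ↔ (List.countP
            (fun p => decide ((pvTarget want number).getD p 0 = (List.count p W : Int))) want
          = want.length) := by
  have hnd : (pvKeys want number).Nodup := PySem.Dict.nodup_keys_ofList _
  have hkeq : pvKeys want number = PySem.Set.ofList (want.take number.length) := by
    unfold pvKeys pvTarget
    rw [keys_ofList, map_fst_zip_take]
  have hmemk : ∀ p, p ∈ pvKeys want number ↔ p ∈ want.take number.length := by
    intro p; rw [hkeq, PySem.Set.mem_ofList]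
  have hwk : ∀ p ∈ want, p ∈ pvKeys want number := fun p hp => (hmemk p).mpr (hpre p hp)
  have hkw : ∀ p ∈ pvKeys want number, p ∈ want := fun p hp => List.mem_of_mem_take ((hmemk p).mp hp)
  rw [List.countP_eq_length]
  constructor
  · intro hv p hp
    rw [decide_eq_true_eq]
    obtain ⟨t, ht, hpt⟩ := List.mem_iff_getElem.mp (hwk p hp)
    subst hpt
    have he := List.getElem_of_eq hv (i := t) (by rw [pvVec_length]; exact ht)
    rw [pvVec_getElem _ _ t ht, count_map_pvF _ hnd W t ht] at he
    unfold pvNeed at he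
    rw [List.getElem_map] at he
    exact he.symm
  · intro hall
    apply List.ext_getElem (by rw [pvVec_length]; unfold pvNeed; rw [List.length_map])
    intro t h1 h2
    rw [pvVec_length] at h1
    rw [pvVec_getElem _ _ t h1, count_map_pvF _ hnd W t h1]
    unfold pvNeed
    rw [List.getElem_map]
    have hh := hall ((pvKeys want number)[t]) (hkw _ (List.getElem_mem h1))
    rw [decide_eq_true_eq] at hh
    exact hh.symm

theorem pvA_eq (want : List String) (number : List Int) (discount : List String)
    (hpre : ∀ p ∈ want, p ∈ want.take number.length) :
    solution want number discount
      = ((List.range (((discount.length : Int) - 10 + 1).toNat)).countP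
          (pvAm want number discount) : Int) := by
  unfold solution
  rw [PySem.List.pyRange_one, PySem.List.foldl_ite_add_one, List.countP_map, zero_add, sub_zero]
  congr 1
  apply List.countP_congr
  intro k hk
  simp only [Function.comp_apply, decide_eq_true_eq]
  have hsl : PySem.List.slice discount (some ((0 : Int) + (k : Int)))
      (some ((0 : Int) + (k : Int) + 10)) = (discount.drop k).take 10 := by
    rw [zero_add, PySem.List.slice_toNat discount (by omega) (by omega),
      show ((k : Int) + 10).toNat = k + 10 from by omega, Int.toNat_natCast]
    congr 1
    omega
  rw [hsl, PySem.List.foldl_ite_add_one, zero_add, Int.natCast_inj]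
  unfold pvAm
  rw [decide_eq_true_eq]
  have hm := pvMatch want number ((discount.drop k).take 10) hpre
  simp only [PySem.List.count_eq] at *
  exact (Iff.symm hm)

theorem pvB_eq (want : List String) (number : List Int) (discount : List String)
    (hlen : 10 ≤ discount.length) :
    solution_alt want number discount
      = ((List.range (((discount.length : Int) - 10 + 1).toNat)).countP
          (pvAm want number discount) : Int) := by
  have hnd : ((PySem.Dict.ofList (want.zip number)).keys).Nodup :=
    PySem.Dict.nodup_keys_ofList _
  unfold solution_alt
  simp only [List.length_map]
  rw [if_neg (by omega : ¬((discount.length : Int) < 10))]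
  rw [show (fun x => (PySem.Dict.ofList ((PySem.List.enumerate
        ((PySem.Dict.ofList (want.zip number)).keys) 0).map (fun e => (e.2, e.1)))).getD x (-1))
      = pvF ((PySem.Dict.ofList (want.zip number)).keys)
    from funext (fun x => idx_getD _ x hnd)]
  set dd := discount.map (pvF ((PySem.Dict.ofList (want.zip number)).keys)) with hdd
  have hddlen : dd.length = discount.length := by rw [hdd, List.length_map]
  have hd : ∀ j ∈ dd, j = -1 ∨ (0 ≤ j ∧ j.toNat < ((PySem.Dict.ofList (want.zip number)).keys).length) := by
    intro j hj
    rw [hdd] at hj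
    obtain ⟨x, -, rfl⟩ := List.mem_map.mp hj
    exact pvF_range _ x
  rw [PySem.List.slice_to dd (by norm_num : (0 : Int) ≤ 10),
    show ((10 : Int)).toNat = 10 from rfl, ← pvVec_nil,
    pvBuild ((PySem.Dict.ofList (want.zip number)).keys).length (dd.take 10) []
      (fun j hj => hd j (List.mem_of_mem_take hj)),
    List.nil_append, PySem.List.pyRange_one,
    pvLoop ((PySem.Dict.ofList (want.zip number)).keys).length _ dd hd
      (((discount.length : Int) - 10).toNat) (by omega) (by omega)]
  simp only []
  have hgen : ∀ s : Nat, (dd.drop s).take 10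
      = ((discount.drop s).take 10).map (pvF ((PySem.Dict.ofList (want.zip number)).keys)) := by
    intro s
    rw [hdd, ← List.map_drop, ← List.map_take]
  have h0 := hgen 0
  rw [List.drop_zero] at h0
  rw [show ((discount.length : Int) - 10 + 1).toNat
      = ((discount.length : Int) - 10).toNat + 1 from by omega,
    List.range_succ_eq_map, List.countP_cons, List.countP_map]
  simp only [Function.comp_def, Nat.succ_eq_add_one]
  unfold pvAm pvNeed pvKeys pvTarget
  rw [h0]
  simp only [hgen, decide_eq_true_eq]
  split_ifs with h
  · push_cast
    ring
  · push_cast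
    ring

-- ===== VERDICT (by name: the statement is the Claim_ definition above) =====
theorem solution_spec : Claim_equal_solution := by
  unfold Claim_equal_solution
  intro want number discount hdom hpre
  unfold Spec_solution
  by_cases hlen : discount.length < 10
  · -- no 10-day window: both sides are 0
    have ha : solution want number discount = 0 := by
      unfold solution
      rw [PySem.List.pyRange_one_eq_nil (by omega)]
      rfl
    have hb : solution_alt want number discount = 0 := by
      unfold solution_alt
      rw [if_pos (by rw [List.length_map]; exact_mod_cast hlen)]
    rw [ha, hb]
  · have hpre' : ∀ p ∈ want, p ∈ want.take number.length := by
      rcases hpre with h | h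
      · omega
      · exact h
    rw [pvA_eq want number discount hpre', pvB_eq want number discount (by omega)]
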